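-- pv_equiv track=rewrite | github.com/rainSax/CS325_400 | CS325_HW5/FeedDog.py | feedDog
-- ===== SOURCE A (Python) =====
-- def feedDog(hunger_level, biscuit_size):
--     count = 0
--     fedDogs = [False] * len(hunger_level)
--     usedBiscuits = [False] * len(biscuit_size)
--     for i in range(0, len(biscuit_size)):
--         for j in range(0, len(hunger_level)):
--             if not fedDogs[j] and not usedBiscuits[i]:
--                 if biscuit_size[i] == hunger_level[j]:
--                     count += 1
--                     fedDogs[j] = True
--                     usedBiscuits[i] = True
--     for i in range(0, len(biscuit_size)):
--         for j in range(0, len(hunger_level)):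
--             if not fedDogs[j] and not usedBiscuits[i]:
--                 if biscuit_size[i] > hunger_level[j]:
--                     count += 1
--                     fedDogs[j] = True
--                     usedBiscuits[i] = True
--     return count
-- ===== SOURCE B (Python) =====
-- def feedDog(hunger_level, biscuit_size):
--     # counting pass for equal matches, then greedy leftmost scan on the surviving dogs
--     ch = {}
--     for h in hunger_level:
--         ch[h] = ch.get(h, 0) + 1
--     cb = {}
--     for b in biscuit_size:
--         cb[b] = cb.get(b, 0) + 1
--     count = 0
--     for v in ch:
--         count += min(ch[v], cb.get(v, 0))
--     dogs = []
--     seen = {}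
--     for h in hunger_level:
--         k = seen.get(h, 0)
--         if k >= cb.get(h, 0):
--             dogs.append(h)
--         seen[h] = k + 1
--     seenb = {}
--     for b in biscuit_size:
--         k = seenb.get(b, 0)
--         if k >= ch.get(b, 0):
--             for idx in range(len(dogs)):
--                 if dogs[idx] < b:
--                     del dogs[idx]
--                     count += 1
--                     break
--         seenb[b] = k + 1
--     return count
-- ===== Notes on version B (the rewrite author's own statement) =====
-- stated objective: faster
-- what changed: A's two quadratic nested index loops over boolean flag arrays are replaced by a counting (multiset) pass that resolves all equal-size matches via per-value occurrence counts in one sweep, plus a greedy early-exit scan over an explicitly maintained shrinking list of still-unfed dogs for the larger-biscuit pass.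
import Mathlib
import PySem

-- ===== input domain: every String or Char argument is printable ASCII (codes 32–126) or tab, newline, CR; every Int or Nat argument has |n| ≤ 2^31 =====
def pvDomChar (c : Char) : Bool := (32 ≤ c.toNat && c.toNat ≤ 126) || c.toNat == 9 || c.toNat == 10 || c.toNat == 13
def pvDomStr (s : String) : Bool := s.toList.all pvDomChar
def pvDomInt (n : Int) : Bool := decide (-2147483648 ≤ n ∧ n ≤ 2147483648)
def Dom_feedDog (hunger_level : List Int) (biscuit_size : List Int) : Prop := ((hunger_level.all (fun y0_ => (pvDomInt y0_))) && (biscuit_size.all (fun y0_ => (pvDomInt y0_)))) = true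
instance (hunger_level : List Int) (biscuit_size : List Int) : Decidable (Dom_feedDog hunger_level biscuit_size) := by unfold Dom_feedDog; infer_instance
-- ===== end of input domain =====

-- B replaces A's quadratic flag-array double loops by a counting pass for the equal
-- matches and a greedy scan over a shrinking survivor list for the larger-biscuit pass.

-- ===== PORT A =====
-- A's two passes are the same nested index loop, differing only in the comparison;
-- `feedDogAPass cmp` is that nested loop, literally: state = (count, fedDogs, usedBiscuits).
def feedDogAPass (hunger_level : List Int) (biscuit_size : List Int) (cmp : Int → Int → Bool)
    (s0 : Int × List Bool × List Bool) : Int × List Bool × List Bool :=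
  (PySem.List.pyRange 0 (PySem.List.len biscuit_size) 1).foldl (fun s i =>
    (PySem.List.pyRange 0 (PySem.List.len hunger_level) 1).foldl (fun s j =>
      if !(PySem.List.pyGetD s.2.1 j false) && !(PySem.List.pyGetD s.2.2 i false) then
        if cmp (PySem.List.pyGetD biscuit_size i 0) (PySem.List.pyGetD hunger_level j 0) then
          (s.1 + 1, PySem.List.pySetD s.2.1 j true, PySem.List.pySetD s.2.2 i true)
        else s
      else s) s) s0

def feedDog (hunger_level : List Int) (biscuit_size : List Int) : Int :=
  let s1 := feedDogAPass hunger_level biscuit_size (fun b h => b == h)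
      (0, List.replicate hunger_level.length false, List.replicate biscuit_size.length false)
  (feedDogAPass hunger_level biscuit_size (fun b h => h < b) s1).1

-- ===== PORT B =====
-- port of Source B's inner `for idx in range(len(dogs)): if dogs[idx] < b: del dogs[idx]; break`:
-- remove the first element smaller than b (none = no such element).
def delFirstLt (b : Int) : List Int → Option (List Int)
  | [] => none
  | h :: t => if h < b then some t else (delFirstLt b t).map (h :: ·)

def feedDog_alt (hunger_level : List Int) (biscuit_size : List Int) : Int :=
  let ch := hunger_level.foldl (fun d h => d.insert h (d.getD h 0 + 1)) (PySem.Dict.empty : PySem.Dict Int Int)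
  let cb := biscuit_size.foldl (fun d b => d.insert b (d.getD b 0 + 1)) (PySem.Dict.empty : PySem.Dict Int Int)
  let count : Int := ch.keys.foldl (fun c v => c + min (ch.getD v 0) (cb.getD v 0)) 0
  let ds := hunger_level.foldl (fun (p : List Int × PySem.Dict Int Int) h =>
      let k := p.2.getD h 0
      (if cb.getD h 0 ≤ k then p.1 ++ [h] else p.1, p.2.insert h (k + 1)))
    ([], PySem.Dict.empty)
  let r := biscuit_size.foldl (fun (p : Int × List Int × PySem.Dict Int Int) b =>
      let k := p.2.2.getD b 0
      let p' := if ch.getD b 0 ≤ k then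
          match delFirstLt b p.2.1 with
          | some ds' => (p.1 + 1, ds')
          | none => (p.1, p.2.1)
        else (p.1, p.2.1)
      (p'.1, p'.2, p.2.2.insert b (k + 1)))
    (count, ds.1, PySem.Dict.empty)
  r.1

-- ===== PRECONDITION & SPEC =====
def Spec_feedDog (hunger_level : List Int) (biscuit_size : List Int) (out : Int) : Prop := out = feedDog_alt hunger_level biscuit_size
instance (hunger_level : List Int) (biscuit_size : List Int) (out : Int) : Decidable (Spec_feedDog hunger_level biscuit_size out) := by unfold Spec_feedDog; infer_instance

-- ===== CLAIM (what is proved, stated in full; the proofs are below) =====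
def Claim_equal_feedDog : Prop := ∀ (hunger_level : List Int) (biscuit_size : List Int), Dom_feedDog hunger_level biscuit_size → Spec_feedDog hunger_level biscuit_size (feedDog hunger_level biscuit_size)

-- ===== LEMMAS AND PROOFS =====

-- point update of a budget function
def pvUpd (B : Int → Nat) (v : Int) (x : Nat) : Int → Nat := fun w => if w = v then x else B w

lemma pvUpd_same (B : Int → Nat) (v : Int) (x : Nat) : pvUpd B v x v = x := by simp [pvUpd]

lemma pvUpd_ne (B : Int → Nat) (v w : Int) (x : Nat) (h : w ≠ v) : pvUpd B v x w = B w := by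
  simp [pvUpd, h]

lemma pvUpd_upd (B : Int → Nat) (v : Int) (x y : Nat) : pvUpd (pvUpd B v x) v y = pvUpd B v y := by
  funext w; by_cases h : w = v <;> simp [pvUpd, h]

lemma pvUpd_comm (B : Int → Nat) (v w : Int) (x y : Nat) (h : v ≠ w) :
    pvUpd (pvUpd B v x) w y = pvUpd (pvUpd B w y) v x := by
  funext u; by_cases h1 : u = w <;> by_cases h2 : u = v <;> simp_all [pvUpd]

-- feed the first unfed dog satisfying p (list-level model of A's inner loop)
def pvFeedFirst (p : Int → Bool) : List Int → List Bool → Option (List Bool)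
  | [], _ => none
  | _ :: _, [] => none
  | h :: hs, f :: fs =>
    if !f && p h then some (true :: fs)
    else (pvFeedFirst p hs fs).map (f :: ·)

lemma pvFeedFirst_length (p : Int → Bool) :
    ∀ (l : List Int) (fs fs' : List Bool), pvFeedFirst p l fs = some fs' → fs'.length = fs.length := by
  intro l
  induction l with
  | nil => intro fs fs' h; simp [pvFeedFirst] at h
  | cons h t ih =>
    intro fs fs' hf
    cases fs with
    | nil => simp [pvFeedFirst] at hf
    | cons f ft =>
      simp only [pvFeedFirst] at hf
      split at hf
      · simp only [Option.some.injEq] at hf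
        subst hf
        simp
      · cases hx : pvFeedFirst p t ft with
        | none => rw [hx] at hf; simp at hf
        | some fs'' =>
          rw [hx] at hf
          simp only [Option.map_some, Option.some.injEq] at hf
          subst hf
          simp [ih ft fs'' hx]

-- the unfed dogs, in order
def pvRem (hunger : List Int) (fed : List Bool) : List Int :=
  ((hunger.zip fed).filter (fun q => !q.2)).map (·.1)

-- fed flags from a per-value budget: a dog is fed while its value still has budget
def pvFedMark (B : Int → Nat) : List Int → List Bool
  | [] => []
  | h :: hs => decide (0 < B h) :: pvFedMark (pvUpd B h (B h - 1)) hs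

-- the dogs left unfed by budget B
def pvUnfed (B : Int → Nat) : List Int → List Int
  | [] => []
  | h :: hs => if 0 < B h then pvUnfed (pvUpd B h (B h - 1)) hs
               else h :: pvUnfed (pvUpd B h (B h - 1)) hs

-- per-biscuit "was used in pass 1" flags from a per-value budget
def pvFlags (T : Int → Nat) : List Int → List Bool
  | [] => []
  | b :: bs => decide (0 < T b) :: pvFlags (pvUpd T b (T b - 1)) bs

lemma pvFlags_length (T : Int → Nat) (bs : List Int) : (pvFlags T bs).length = bs.length := by
  induction bs generalizing T with
  | nil => simp [pvFlags]
  | cons b bs ih => simp [pvFlags, ih]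

-- list-level model of one of A's passes: biscuits paired with their used-flags;
-- returns final (count, fed) and the outgoing used-flags
def pvMpass (cmp : Int → Int → Bool) (hunger : List Int) :
    List (Int × Bool) → Int × List Bool → (Int × List Bool) × List Bool
  | [], s => (s, [])
  | (b, u) :: bs, (c, fed) =>
    if u then
      let r := pvMpass cmp hunger bs (c, fed)
      (r.1, true :: r.2)
    else
      match pvFeedFirst (cmp b) hunger fed with
      | none =>
        let r := pvMpass cmp hunger bs (c, fed)
        (r.1, false :: r.2)
      | some fed' =>
        let r := pvMpass cmp hunger bs (c + 1, fed')
        (r.1, true :: r.2)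

lemma pvCountConsNe (v b : Int) (l : List Int) (h : v ≠ b) :
    List.count v (b :: l) = List.count v l := by
  simp [List.count_cons]
  exact fun hh => h hh.symm

lemma pvMpass_cons_true (cmp : Int → Int → Bool) (hunger : List Int) (b : Int)
    (bs : List (Int × Bool)) (c : Int) (fed : List Bool) :
    pvMpass cmp hunger ((b, true) :: bs) (c, fed)
      = (let r := pvMpass cmp hunger bs (c, fed); (r.1, true :: r.2)) := by
  simp [pvMpass]

lemma pvMpass_cons_false_none (cmp : Int → Int → Bool) (hunger : List Int) (b : Int)
    (bs : List (Int × Bool)) (c : Int) (fed : List Bool)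
    (hx : pvFeedFirst (cmp b) hunger fed = none) :
    pvMpass cmp hunger ((b, false) :: bs) (c, fed)
      = (let r := pvMpass cmp hunger bs (c, fed); (r.1, false :: r.2)) := by
  simp [pvMpass, hx]

lemma pvMpass_cons_false_some (cmp : Int → Int → Bool) (hunger : List Int) (b : Int)
    (bs : List (Int × Bool)) (c : Int) (fed fed' : List Bool)
    (hx : pvFeedFirst (cmp b) hunger fed = some fed') :
    pvMpass cmp hunger ((b, false) :: bs) (c, fed)
      = (let r := pvMpass cmp hunger bs (c + 1, fed'); (r.1, true :: r.2)) := by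
  simp [pvMpass, hx]

-- A's inner loop body, with natural-number indexing (normal form of the pyRange fold)
def pvIBody (cmp : Int → Int → Bool) (hunger : List Int) (b : Int) (i : Nat)
    (s : Int × List Bool × List Bool) (k : Nat) : Int × List Bool × List Bool :=
  if !(s.2.1.getD k false) && !(s.2.2.getD i false) then
    if cmp b (hunger.getD k 0) then (s.1 + 1, s.2.1.set k true, s.2.2.set i true) else s
  else s

def pvInnerN (cmp : Int → Int → Bool) (hunger : List Int) (b : Int) (i : Nat)
    (s : Int × List Bool × List Bool) : Int × List Bool × List Bool :=
  (List.range hunger.length).foldl (pvIBody cmp hunger b i) s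

def pvAPassN (cmp : Int → Int → Bool) (hunger biscuit : List Int)
    (s0 : Int × List Bool × List Bool) : Int × List Bool × List Bool :=
  (List.range biscuit.length).foldl (fun s i => pvInnerN cmp hunger (biscuit.getD i 0) i s) s0

lemma pvAPass_eq (hunger biscuit : List Int) (cmp : Int → Int → Bool) (s0 : Int × List Bool × List Bool) :
    feedDogAPass hunger biscuit cmp s0 = pvAPassN cmp hunger biscuit s0 := by
  simp only [feedDogAPass, pvAPassN, pvInnerN, PySem.List.pyRange_one, List.foldl_map,
    PySem.List.len_eq, sub_zero, Int.toNat_natCast, zero_add, PySem.List.pyGetD_natCast,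
    PySem.List.pySetD_natCast]
  rfl

-- once the biscuit's used-flag is set, the inner body does nothing
lemma pvIBody_skip (cmp : Int → Int → Bool) (hunger : List Int) (b : Int) (i : Nat)
    (s : Int × List Bool × List Bool) (k : Nat) (h : s.2.2.getD i false = true) :
    pvIBody cmp hunger b i s k = s := by
  unfold pvIBody
  rw [h]
  simp

-- shifting the biscuit index by one = consing a fixed head onto the used list
lemma pvIBody_shift (cmp : Int → Int → Bool) (hunger : List Int) (b : Int) (i : Nat)
    (c : Int) (fed : List Bool) (u : Bool) (us : List Bool) (k : Nat) :
    pvIBody cmp hunger b (i + 1) (c, fed, u :: us) k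
      = (let r := pvIBody cmp hunger b i (c, fed, us) k; (r.1, r.2.1, u :: r.2.2)) := by
  simp only [pvIBody, List.getD_cons_succ, List.set_cons_succ]
  by_cases h1 : (!(fed.getD k false) && !(us.getD i false)) = true
  · rw [if_pos h1, if_pos h1]
    by_cases h2 : cmp b (hunger.getD k 0) = true
    · rw [if_pos h2, if_pos h2]
    · rw [if_neg h2, if_neg h2]
  · rw [if_neg h1, if_neg h1]

lemma pvInnerShiftFold (cmp : Int → Int → Bool) (hunger : List Int) (g : Nat → Int) (i : Nat) (L : List Nat) :
    ∀ (c : Int) (fed : List Bool) (u : Bool) (us : List Bool),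
      L.foldl (fun s k => pvIBody cmp hunger (g k) (i + 1) s k) (c, fed, u :: us)
      = (let r := L.foldl (fun s k => pvIBody cmp hunger (g k) i s k) (c, fed, us); (r.1, r.2.1, u :: r.2.2)) := by
  induction L with
  | nil => intro c fed u us; rfl
  | cons k L ih =>
    intro c fed u us
    simp only [List.foldl_cons, pvIBody_shift]
    exact ih _ _ _ _

lemma pvInnerShift (cmp : Int → Int → Bool) (hunger : List Int) (b : Int) (i : Nat)
    (c : Int) (fed : List Bool) (u : Bool) (us : List Bool) :
    pvInnerN cmp hunger b (i + 1) (c, fed, u :: us)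
      = (let r := pvInnerN cmp hunger b i (c, fed, us); (r.1, r.2.1, u :: r.2.2)) :=
  pvInnerShiftFold cmp hunger (fun _ => b) i (List.range hunger.length) c fed u us

lemma pvOuterShiftFold (cmp : Int → Int → Bool) (hunger : List Int) (g : Nat → Int) (L : List Nat) :
    ∀ (c : Int) (fed : List Bool) (u : Bool) (us : List Bool),
      L.foldl (fun s k => pvInnerN cmp hunger (g k) (k + 1) s) (c, fed, u :: us)
      = (let r := L.foldl (fun s k => pvInnerN cmp hunger (g k) k s) (c, fed, us);
         (r.1, r.2.1, u :: r.2.2)) := by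
  induction L with
  | nil => intro c fed u us; rfl
  | cons k L ih =>
    intro c fed u us
    simp only [List.foldl_cons, pvInnerShift]
    exact ih _ _ _ _

-- shifting the dog index by one = consing a fixed head onto hunger and fed
lemma pvIBody_jshift (cmp : Int → Int → Bool) (h : Int) (hs : List Int) (b : Int) (i : Nat)
    (c : Int) (f : Bool) (fs : List Bool) (used : List Bool) (k : Nat) :
    pvIBody cmp (h :: hs) b i (c, f :: fs, used) (k + 1)
      = (let r := pvIBody cmp hs b i (c, fs, used) k; (r.1, f :: r.2.1, r.2.2)) := by
  simp only [pvIBody, List.getD_cons_succ, List.set_cons_succ]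
  by_cases h1 : (!(fs.getD k false) && !(used.getD i false)) = true
  · rw [if_pos h1, if_pos h1]
    by_cases h2 : cmp b (hs.getD k 0) = true
    · rw [if_pos h2, if_pos h2]
    · rw [if_neg h2, if_neg h2]
  · rw [if_neg h1, if_neg h1]

lemma pvJShiftFold (cmp : Int → Int → Bool) (h : Int) (hs : List Int) (b : Int) (i : Nat) (L : List Nat) :
    ∀ (c : Int) (f : Bool) (fs : List Bool) (used : List Bool),
      L.foldl (fun s k => pvIBody cmp (h :: hs) b i s (k + 1)) (c, f :: fs, used)
      = (let r := L.foldl (pvIBody cmp hs b i) (c, fs, used); (r.1, f :: r.2.1, r.2.2)) := by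
  induction L with
  | nil => intro c f fs used; rfl
  | cons k L ih =>
    intro c f fs used
    simp only [List.foldl_cons, pvIBody_jshift]
    exact ih _ _ _ _

-- A's inner loop IS "feed the first unfed matching dog"
lemma pvInner_eq (cmp : Int → Int → Bool) (b : Int) :
    ∀ (hunger : List Int) (fed : List Bool) (i : Nat) (used : List Bool) (c : Int),
      hunger.length ≤ fed.length → i < used.length → used.getD i false = false →
      pvInnerN cmp hunger b i (c, fed, used)
        = match pvFeedFirst (cmp b) hunger fed with
          | none => (c, fed, used)
          | some fed' => (c + 1, fed', used.set i true) := by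
  intro hunger
  induction hunger with
  | nil =>
    intro fed i used c _ _ _
    simp [pvInnerN, pvFeedFirst]
  | cons h hs ih =>
    intro fed i used c hlen hi hu
    cases fed with
    | nil => simp at hlen
    | cons f ft =>
      have hlen' : hs.length ≤ ft.length := by simpa using hlen
      rw [pvInnerN]
      simp only [List.length_cons]
      rw [List.range_succ_eq_map, List.foldl_cons]
      have hstep : pvIBody cmp (h :: hs) b i (c, f :: ft, used) 0
          = if (!f && cmp b h) = true then (c + 1, true :: ft, used.set i true)
            else (c, f :: ft, used) := by
        have hu' : used[i]?.getD false = false := by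
          simpa [List.getD_eq_getElem?_getD] using hu
        by_cases hf : f = true <;> by_cases hc : cmp b h = true <;>
          simp [pvIBody, hf, hc, hu']
      rw [hstep]
      by_cases hcond : (!f && cmp b h) = true
      · rw [if_pos hcond, List.foldl_map]
        have hset : ((c + 1, true :: ft, used.set i true) :
            Int × List Bool × List Bool).2.2.getD i false = true := by
          simp [List.getD_eq_getElem?_getD, hi]
        have hfix : List.foldl (fun x y => pvIBody cmp (h :: hs) b i x y.succ)
            (c + 1, true :: ft, used.set i true) (List.range hs.length)
            = (c + 1, true :: ft, used.set i true) :=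
          List.foldl_fixed' (fun k => pvIBody_skip cmp (h :: hs) b i _ k.succ hset) _
        rw [hfix]
        simp only [pvFeedFirst]
        rw [if_pos hcond]
      · rw [if_neg hcond, List.foldl_map]
        simp only [Nat.succ_eq_add_one]
        rw [pvJShiftFold]
        have := ih ft i used c hlen' hi hu
        rw [pvInnerN] at this
        rw [this]
        simp only [pvFeedFirst]
        rw [if_neg hcond]
        cases hx : pvFeedFirst (cmp b) hs ft with
        | none => simp
        | some fed' => simp

-- A's pass (index form) IS the list-level model pass
lemma pvOuter_eq (cmp : Int → Int → Bool) (hunger : List Int) :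
    ∀ (bs : List Int) (us : List Bool) (c : Int) (fed : List Bool),
      us.length = bs.length → hunger.length ≤ fed.length →
      pvAPassN cmp hunger bs (c, fed, us)
        = ((pvMpass cmp hunger (bs.zip us) (c, fed)).1.1,
           (pvMpass cmp hunger (bs.zip us) (c, fed)).1.2,
           (pvMpass cmp hunger (bs.zip us) (c, fed)).2) := by
  intro bs
  induction bs with
  | nil =>
    intro us c fed hus _
    cases us with
    | nil => simp [pvAPassN, pvMpass]
    | cons _ _ => simp at hus
  | cons b bs ih =>
    intro us c fed hus hlen
    cases us with
    | nil => simp at hus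
    | cons u us =>
      have hus' : us.length = bs.length := by simpa using hus
      rw [pvAPassN]
      simp only [List.length_cons]
      rw [List.range_succ_eq_map, List.foldl_cons]
      have hgd : ∀ k : Nat, (b :: bs).getD (k + 1) 0 = bs.getD k 0 := fun k => List.getD_cons_succ ..
      cases u with
      | true =>
        have h0 : pvInnerN cmp hunger ((b :: bs).getD 0 0) 0 (c, fed, true :: us)
            = (c, fed, true :: us) := by
          apply List.foldl_fixed'
          intro k
          exact pvIBody_skip _ _ _ _ _ _ (by simp)
        rw [h0, List.foldl_map]
        simp only [Nat.succ_eq_add_one, hgd]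
        rw [pvOuterShiftFold cmp hunger (fun k => bs.getD k 0)]
        have hrec := ih us c fed hus' hlen
        rw [pvAPassN] at hrec
        rw [hrec]
        simp [pvMpass]
      | false =>
        cases hx : pvFeedFirst (cmp b) hunger fed with
        | none =>
          have h0 : pvInnerN cmp hunger ((b :: bs).getD 0 0) 0 (c, fed, false :: us)
              = (c, fed, false :: us) := by
            rw [List.getD_cons_zero,
              pvInner_eq cmp b hunger fed 0 (false :: us) c hlen (by simp) (by simp), hx]
          rw [h0, List.foldl_map]
          simp only [Nat.succ_eq_add_one, hgd]
          rw [pvOuterShiftFold cmp hunger (fun k => bs.getD k 0)]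
          have hrec := ih us c fed hus' hlen
          rw [pvAPassN] at hrec
          rw [hrec]
          simp [pvMpass, hx]
        | some fed' =>
          have h0 : pvInnerN cmp hunger ((b :: bs).getD 0 0) 0 (c, fed, false :: us)
              = (c + 1, fed', true :: us) := by
            rw [List.getD_cons_zero,
              pvInner_eq cmp b hunger fed 0 (false :: us) c hlen (by simp) (by simp), hx]
            rfl
          rw [h0, List.foldl_map]
          simp only [Nat.succ_eq_add_one, hgd]
          have hlen2 : hunger.length ≤ fed'.length := by
            rw [pvFeedFirst_length (cmp b) hunger fed fed' hx]; exact hlen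
          rw [pvOuterShiftFold cmp hunger (fun k => bs.getD k 0)]
          have hrec := ih us (c + 1) fed' hus' hlen2
          rw [pvAPassN] at hrec
          rw [hrec]
          simp [pvMpass, hx]

-- sum-difference helper: two maps agreeing off b
lemma pvSumDiff (l : List Int) (f g : Int → Nat) (b : Int) (hb : b ∈ l) (hnd : l.Nodup)
    (hfg : ∀ v ∈ l, v ≠ b → f v = g v) :
    (l.map f).sum + g b = (l.map g).sum + f b := by
  induction l with
  | nil => simp at hb
  | cons a l ih =>
    rcases List.mem_cons.mp hb with hba | hbl
    · have hnotin : b ∉ l := hba ▸ (List.nodup_cons.mp hnd).1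
      have hmg : l.map f = l.map g := List.map_congr_left
        (fun v hv => hfg v (List.mem_cons_of_mem _ hv) (fun h => hnotin (h ▸ hv)))
      simp only [List.map_cons, List.sum_cons, hmg]
      rw [← hba]
      omega
    · have hne : a ≠ b := fun h => (List.nodup_cons.mp hnd).1 (h ▸ hbl)
      have hrec := ih hbl (List.nodup_cons.mp hnd).2
        (fun v hv hvb => hfg v (List.mem_cons_of_mem _ hv) hvb)
      have hag : f a = g a := hfg a (by simp) hne
      simp only [List.map_cons, List.sum_cons, hag]
      omega

-- feeding an equal dog on a budget-marked fed list
lemma pvFeedFirst_fedMark (b : Int) :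
    ∀ (hunger : List Int) (B : Int → Nat),
      pvFeedFirst (fun h => b == h) hunger (pvFedMark B hunger)
        = if B b < hunger.count b then some (pvFedMark (pvUpd B b (B b + 1)) hunger) else none := by
  intro hunger
  induction hunger with
  | nil => intro B; simp [pvFeedFirst]
  | cons h hs ih =>
    intro B
    simp only [pvFedMark, pvFeedFirst]
    by_cases hhb : h = b
    · subst hhb
      by_cases h0 : 0 < B h
      · rw [if_neg (by simp [h0])]
        rw [ih (pvUpd B h (B h - 1)), pvUpd_same]
        by_cases hlt : B h - 1 < hs.count h
        · rw [if_pos hlt, if_pos (by simp [List.count_cons_self]; omega)]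
          simp only [Option.map_some, Option.some.injEq]
          rw [pvUpd_upd, pvUpd_upd, pvUpd_same]
          have h1 : B h - 1 + 1 = B h + 1 - 1 := by omega
          have h2 : (decide (0 < B h)) = (decide (0 < B h + 1)) := by
            simp [h0]
          rw [h1, h2]
        · rw [if_neg hlt, if_neg (by simp [List.count_cons_self]; omega)]
          rfl
      · have hb0 : B h = 0 := by omega
        rw [if_pos (by simp [h0])]
        rw [if_pos (by simp [List.count_cons_self]; omega)]
        simp only [Option.some.injEq]
        rw [pvUpd_upd, pvUpd_same]
        have h1 : B h - 1 = B h + 1 - 1 := by omega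
        have h2 : (true : Bool) = decide (0 < B h + 1) := by simp
        rw [h1]
        exact congrArg₂ (· :: ·) h2 rfl
    · have hbeq : (b == h) = false := by
        simp [beq_eq_false_iff_ne]; exact fun hh => hhb hh.symm
      rw [if_neg (by simp [hbeq])]
      rw [ih (pvUpd B h (B h - 1)), pvUpd_ne _ _ _ _ (fun hh => hhb hh.symm)]
      have hcnt : List.count b (h :: hs) = List.count b hs := by
        simp [List.count_cons]
        exact hhb
      rw [hcnt]
      by_cases hlt : B b < hs.count b
      · rw [if_pos hlt, if_pos hlt]
        simp only [Option.map_some, Option.some.injEq]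
        rw [pvUpd_ne B b h _ hhb, pvUpd_comm B h b _ _ hhb]
      · rw [if_neg hlt, if_neg hlt]
        rfl

lemma pvFedMark_zero (l : List Int) : ∀ (B : Int → Nat), (∀ v, B v = 0) →
    pvFedMark B l = List.replicate l.length false := by
  induction l with
  | nil => intro B h; simp [pvFedMark]
  | cons x l ih =>
    intro B h
    simp only [pvFedMark, List.length_cons, List.replicate_succ, h x]
    refine congrArg₂ (· :: ·) (by simp) ?_
    exact ih _ (fun v => by by_cases hv : v = x <;> simp [pvUpd, hv, h])

-- pass 1 characterized: count, fed flags and used flags in closed budget form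
lemma pvP1 (hunger : List Int) :
    ∀ (bs : List Int) (B : Int → Nat) (c : Int),
      pvMpass (fun b h => b == h) hunger (bs.zip (List.replicate bs.length false)) (c, pvFedMark B hunger)
        = ((c + (((PySem.List.dedup hunger).map (fun v => min (hunger.count v - B v) (bs.count v))).sum : Nat),
            pvFedMark (fun v => B v + min (hunger.count v - B v) (bs.count v)) hunger),
           pvFlags (fun v => hunger.count v - B v) bs) := by
  intro bs
  induction bs with
  | nil =>
    intro B c
    simp only [List.zip_nil_left]
    have hz : ∀ v, min (hunger.count v - B v) (List.count v ([] : List Int)) = 0 := by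
      intro v; simp
    have hs0 : (((PySem.List.dedup hunger).map
        (fun v => min (hunger.count v - B v) (List.count v ([] : List Int)))).sum : Nat) = 0 := by
      rw [List.map_congr_left (fun v _ => hz v)]
      simp
    have hf0 : (fun v => B v + min (hunger.count v - B v) (List.count v ([] : List Int))) = B := by
      funext v
      rw [hz v]
      omega
    rw [hs0, hf0]
    simp [pvMpass, pvFlags]
  | cons b bs ih =>
    intro B c
    simp only [List.length_cons, List.replicate_succ, List.zip_cons_cons]
    by_cases hb : B b < hunger.count b
    · have hx := pvFeedFirst_fedMark b hunger B
      rw [if_pos hb] at hx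
      rw [pvMpass_cons_false_some _ _ _ _ _ _ _ hx, ih (pvUpd B b (B b + 1)) (c + 1)]
      have hmem : b ∈ PySem.List.dedup hunger := by
        rw [PySem.List.mem_dedup]
        exact List.count_pos_iff.mp (Nat.lt_of_le_of_lt (Nat.zero_le _) hb)
      have hnd : (PySem.List.dedup hunger).Nodup := PySem.List.nodup_dedup hunger
      have hoff : ∀ v ∈ PySem.List.dedup hunger, v ≠ b →
          min (hunger.count v - pvUpd B b (B b + 1) v) (bs.count v)
            = min (hunger.count v - B v) ((b :: bs).count v) := by
        intro v _ hv
        rw [pvUpd_ne _ _ _ _ hv, pvCountConsNe v b bs hv]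
      have hsd := pvSumDiff (PySem.List.dedup hunger)
        (fun v => min (hunger.count v - pvUpd B b (B b + 1) v) (bs.count v))
        (fun v => min (hunger.count v - B v) ((b :: bs).count v)) b hmem hnd hoff
      simp only [pvUpd_same, List.count_cons_self] at hsd
      have hcount : (c + 1) + ((((PySem.List.dedup hunger).map
            (fun v => min (hunger.count v - pvUpd B b (B b + 1) v) (bs.count v))).sum : Nat) : Int)
          = c + ((((PySem.List.dedup hunger).map
            (fun v => min (hunger.count v - B v) ((b :: bs).count v))).sum : Nat) : Int) := by
        omega
      have hfed : (fun v => pvUpd B b (B b + 1) v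
            + min (hunger.count v - pvUpd B b (B b + 1) v) (bs.count v))
          = (fun v => B v + min (hunger.count v - B v) ((b :: bs).count v)) := by
        funext v
        by_cases hv : v = b
        · subst hv
          rw [pvUpd_same, List.count_cons_self]
          omega
        · rw [pvUpd_ne _ _ _ _ hv, pvCountConsNe v b bs hv]
      have hflags : pvFlags (fun v => hunger.count v - pvUpd B b (B b + 1) v) bs
          = pvFlags (pvUpd (fun v => hunger.count v - B v) b (hunger.count b - B b - 1)) bs := by
        congr 1
        funext v
        by_cases hv : v = b
        · subst hv; rw [pvUpd_same, pvUpd_same]; omega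
        · rw [pvUpd_ne _ _ _ _ hv, pvUpd_ne _ _ _ _ hv]
      have hhead : (true : Bool) = decide (0 < hunger.count b - B b) := by
        simp; omega
      rw [hcount, hfed, hflags]
      simp only [pvFlags]
      rw [← hhead]
    · have hx := pvFeedFirst_fedMark b hunger B
      rw [if_neg hb] at hx
      rw [pvMpass_cons_false_none _ _ _ _ _ _ hx, ih B c]
      have hb0 : hunger.count b - B b = 0 := by omega
      have hterm : ∀ v ∈ PySem.List.dedup hunger,
          min (hunger.count v - B v) (bs.count v)
            = min (hunger.count v - B v) ((b :: bs).count v) := by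
        intro v _
        by_cases hv : v = b
        · subst hv; rw [hb0]; simp
        · rw [pvCountConsNe v b bs hv]
      have hsum : ((PySem.List.dedup hunger).map
            (fun v => min (hunger.count v - B v) (bs.count v))).sum
          = ((PySem.List.dedup hunger).map
            (fun v => min (hunger.count v - B v) ((b :: bs).count v))).sum := by
        rw [List.map_congr_left hterm]
      have hfed : (fun v => B v + min (hunger.count v - B v) (bs.count v))
          = (fun v => B v + min (hunger.count v - B v) ((b :: bs).count v)) := by
        funext v
        by_cases hv : v = b
        · subst hv; rw [hb0]; simp
        · rw [pvCountConsNe v b bs hv]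
      have hflags : pvFlags (fun v => hunger.count v - B v) bs
          = pvFlags (pvUpd (fun v => hunger.count v - B v) b (hunger.count b - B b - 1)) bs := by
        congr 1
        funext v
        by_cases hv : v = b
        · subst hv; rw [pvUpd_same]; omega
        · rw [pvUpd_ne _ _ _ _ hv]
      have hhead : (false : Bool) = decide (0 < hunger.count b - B b) := by
        simp; omega
      rw [hsum, hfed, hflags]
      simp only [pvFlags]
      rw [← hhead]

lemma pvRem_fedMark : ∀ (l : List Int) (B : Int → Nat), pvRem l (pvFedMark B l) = pvUnfed B l := by
  intro l
  induction l with
  | nil => intro B; simp [pvRem, pvFedMark, pvUnfed]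
  | cons h hs ih =>
    intro B
    by_cases h0 : 0 < B h <;>
      simp [pvRem, pvFedMark, pvUnfed, h0, ← ih (pvUpd B h (B h - 1))]

lemma pvUnfed_congr : ∀ (l : List Int) (B B' : Int → Nat),
    (∀ v, min (B v) (l.count v) = min (B' v) (l.count v)) → pvUnfed B l = pvUnfed B' l := by
  intro l
  induction l with
  | nil => intro B B' h; rfl
  | cons x l ih =>
    intro B B' h
    have hx := h x
    rw [List.count_cons_self] at hx
    have hhead : (0 < B x) ↔ (0 < B' x) := by omega
    have htail : ∀ v, min (pvUpd B x (B x - 1) v) (l.count v)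
        = min (pvUpd B' x (B' x - 1) v) (l.count v) := by
      intro v
      by_cases hv : v = x
      · subst hv
        rw [pvUpd_same, pvUpd_same]
        omega
      · have hcv := h v
        have hc : List.count v (x :: l) = List.count v l := by
          simp [List.count_cons]
          exact fun hh => hv hh.symm
        rw [hc] at hcv
        rw [pvUpd_ne _ _ _ _ hv, pvUpd_ne _ _ _ _ hv]
        exact hcv
    simp only [pvUnfed]
    rw [ih _ _ htail]
    by_cases h0 : 0 < B x
    · rw [if_pos h0, if_pos (hhead.mp h0)]
    · rw [if_neg h0, if_neg (fun hh => h0 (hhead.mpr hh))]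

-- deleting the first smaller remaining dog = feeding the first unfed smaller dog
lemma pvFF_rem (b : Int) : ∀ (hunger : List Int) (fed : List Bool),
    delFirstLt b (pvRem hunger fed)
      = (pvFeedFirst (fun h => decide (h < b)) hunger fed).map (pvRem hunger) := by
  intro hunger
  induction hunger with
  | nil => intro fed; simp [pvRem, pvFeedFirst, delFirstLt]
  | cons h hs ih =>
    intro fed
    cases fed with
    | nil => simp [pvRem, pvFeedFirst, delFirstLt]
    | cons f ft =>
      cases f with
      | true =>
        have h1 : pvRem (h :: hs) (true :: ft) = pvRem hs ft := by simp [pvRem]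
        have h2 : pvFeedFirst (fun x => decide (x < b)) (h :: hs) (true :: ft)
            = (pvFeedFirst (fun x => decide (x < b)) hs ft).map (true :: ·) := by
          simp [pvFeedFirst]
        rw [h1, h2, ih ft, Option.map_map]
        congr 1
      | false =>
        by_cases hlt : h < b
        · have h1 : pvRem (h :: hs) (false :: ft) = h :: pvRem hs ft := by simp [pvRem]
          have h2 : pvFeedFirst (fun x => decide (x < b)) (h :: hs) (false :: ft)
              = some (true :: ft) := by
            simp [pvFeedFirst, hlt]
          rw [h1, h2]
          simp [delFirstLt, hlt, pvRem]
        · have h1 : pvRem (h :: hs) (false :: ft) = h :: pvRem hs ft := by simp [pvRem]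
          have h2 : pvFeedFirst (fun x => decide (x < b)) (h :: hs) (false :: ft)
              = (pvFeedFirst (fun x => decide (x < b)) hs ft).map (false :: ·) := by
            simp [pvFeedFirst, hlt]
          rw [h1, h2]
          have h3 : delFirstLt b (h :: pvRem hs ft)
              = (delFirstLt b (pvRem hs ft)).map (h :: ·) := by
            simp [delFirstLt, hlt]
          rw [h3, ih ft, Option.map_map, Option.map_map]
          congr 1

-- B's survivor-building loop
lemma pvBDog (biscuit : List Int) (cb : PySem.Dict Int Int)
    (hcb : ∀ v, cb.getD v 0 = (biscuit.count v : Int)) :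
    ∀ (hs : List Int) (dogs0 : List Int) (d : PySem.Dict Int Int) (T : Int → Nat),
      (∀ v, 0 ≤ d.getD v 0 ∧ T v = biscuit.count v - (d.getD v 0).toNat) →
      (hs.foldl (fun (p : List Int × PySem.Dict Int Int) h =>
          let k := p.2.getD h 0
          (if cb.getD h 0 ≤ k then p.1 ++ [h] else p.1, p.2.insert h (k + 1))) (dogs0, d)).1
        = dogs0 ++ pvUnfed T hs := by
  intro hs
  induction hs with
  | nil => intro dogs0 d T hinv; simp [pvUnfed]
  | cons h hs ih =>
    intro dogs0 d T hinv
    obtain ⟨hd0, hT⟩ := hinv h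
    simp only [List.foldl_cons]
    have hinv' : ∀ v, 0 ≤ (d.insert h (d.getD h 0 + 1)).getD v 0 ∧
        pvUpd T h (T h - 1) v
          = biscuit.count v - ((d.insert h (d.getD h 0 + 1)).getD v 0).toNat := by
      intro v
      by_cases hv : v = h
      · subst hv
        rw [PySem.Dict.getD_insert_self d _ _ _, pvUpd_same]
        refine ⟨by omega, by omega⟩
      · rw [PySem.Dict.getD_insert_of_ne d _ _ hv, pvUpd_ne _ _ _ _ hv]
        exact hinv v
    by_cases hkeep : cb.getD h 0 ≤ d.getD h 0
    · have hTh : T h = 0 := by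
        rw [hcb h] at hkeep
        omega
      rw [if_pos hkeep]
      rw [ih (dogs0 ++ [h]) _ _ hinv']
      simp [pvUnfed, hTh]
    · have hTh : 0 < T h := by
        rw [hcb h] at hkeep
        omega
      rw [if_neg hkeep]
      rw [ih dogs0 _ _ hinv']
      simp [pvUnfed, hTh]

-- B's second pass against the model's second pass
lemma pvP2 (hunger : List Int) (ch : PySem.Dict Int Int)
    (hch : ∀ v, ch.getD v 0 = (hunger.count v : Int)) :
    ∀ (bs : List Int) (c : Int) (fed : List Bool) (d : PySem.Dict Int Int) (T : Int → Nat),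
      (∀ v, 0 ≤ d.getD v 0 ∧ T v = hunger.count v - (d.getD v 0).toNat) →
      (bs.foldl (fun (p : Int × List Int × PySem.Dict Int Int) b =>
          let k := p.2.2.getD b 0
          let p' := if ch.getD b 0 ≤ k then
              match delFirstLt b p.2.1 with
              | some ds' => (p.1 + 1, ds')
              | none => (p.1, p.2.1)
            else (p.1, p.2.1)
          (p'.1, p'.2, p.2.2.insert b (k + 1))) (c, pvRem hunger fed, d)).1
        = (pvMpass (fun b h => h < b) hunger (bs.zip (pvFlags T bs)) (c, fed)).1.1 := by
  intro bs
  induction bs with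
  | nil => intro c fed d T hinv; simp [pvMpass, pvFlags]
  | cons b bs ih =>
    intro c fed d T hinv
    obtain ⟨hd0, hT⟩ := hinv b
    simp only [pvFlags, List.zip_cons_cons, List.foldl_cons]
    have hinv' : ∀ v, 0 ≤ (d.insert b (d.getD b 0 + 1)).getD v 0 ∧
        pvUpd T b (T b - 1) v
          = hunger.count v - ((d.insert b (d.getD b 0 + 1)).getD v 0).toNat := by
      intro v
      by_cases hv : v = b
      · subst hv
        rw [PySem.Dict.getD_insert_self d _ _ _, pvUpd_same]
        refine ⟨by omega, by omega⟩
      · rw [PySem.Dict.getD_insert_of_ne d _ _ hv, pvUpd_ne _ _ _ _ hv]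
        exact hinv v
    by_cases hp : ch.getD b 0 ≤ d.getD b 0
    · have hTb : T b = 0 := by
        rw [hch b] at hp
        omega
      rw [show decide (0 < T b) = false by simp [hTb]]
      rw [if_pos hp]
      cases hx : pvFeedFirst (fun h => decide (h < b)) hunger fed with
      | none =>
        have hdel : delFirstLt b (pvRem hunger fed) = none := by
          rw [pvFF_rem, hx]
          rfl
        rw [hdel, pvMpass_cons_false_none _ _ _ _ _ _ hx]
        exact ih c fed _ _ hinv'
      | some fed' =>
        have hdel : delFirstLt b (pvRem hunger fed) = some (pvRem hunger fed') := by
          rw [pvFF_rem, hx]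
          rfl
        rw [hdel, pvMpass_cons_false_some _ _ _ _ _ _ _ hx]
        exact ih (c + 1) fed' _ _ hinv'
    · have hTb : 0 < T b := by
        rw [hch b] at hp
        omega
      rw [show decide (0 < T b) = true by simp [hTb]]
      rw [if_neg hp, pvMpass_cons_true]
      exact ih c fed _ _ hinv' 

lemma pvFedMark_length (l : List Int) : ∀ (B : Int → Nat), (pvFedMark B l).length = l.length := by
  induction l with
  | nil => intro B; rfl
  | cons h hs ih => intro B; simp [pvFedMark, ih]

-- B's counting pass
lemma pvBCount (hunger biscuit : List Int) :
    (PySem.Dict.counter hunger).keys.foldl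
        (fun c v => c + min ((PySem.Dict.counter hunger).getD v 0)
          ((PySem.Dict.counter biscuit).getD v 0)) (0 : Int)
      = ((((PySem.List.dedup hunger).map
          (fun v => min (hunger.count v) (biscuit.count v))).sum : Nat) : Int) := by
  rw [PySem.Dict.keys_counter, ← PySem.List.dedup_eq_ofList, PySem.List.foldl_add, zero_add,
    Nat.cast_list_sum, List.map_map]
  congr 1
  apply List.map_congr_left
  intro v _
  simp [PySem.Dict.getD_counter, Nat.cast_min]

-- ===== VERDICT (by name: the statement is the Claim_ definition above) =====
theorem feedDog_spec : Claim_equal_feedDog := by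
  unfold Claim_equal_feedDog
  intro hunger biscuit _
  unfold Spec_feedDog
  have hA1 : pvAPassN (fun b h => b == h) hunger biscuit
      (0, List.replicate hunger.length false, List.replicate biscuit.length false)
      = (((((PySem.List.dedup hunger).map
            (fun v => min (hunger.count v) (biscuit.count v))).sum : Nat) : Int),
         pvFedMark (fun v => min (hunger.count v) (biscuit.count v)) hunger,
         pvFlags (fun v => hunger.count v) biscuit) := by
    rw [pvOuter_eq _ hunger biscuit (List.replicate biscuit.length false) 0
        (List.replicate hunger.length false) (by simp) (by simp),
      ← pvFedMark_zero hunger (fun _ => 0) (fun _ => rfl),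
      pvP1 hunger biscuit (fun _ => 0) 0]
    have e1 : (fun v => hunger.count v - (fun _ => (0 : Nat)) v) = (fun v => hunger.count v) := by
      funext v; simp
    have e2 : (fun v => (fun _ => (0 : Nat)) v
          + min (hunger.count v - (fun _ => (0 : Nat)) v) (biscuit.count v))
        = (fun v => min (hunger.count v) (biscuit.count v)) := by
      funext v; simp
    have e3 : ((PySem.List.dedup hunger).map
          (fun v => min (hunger.count v - (fun _ => (0 : Nat)) v) (biscuit.count v)))
        = ((PySem.List.dedup hunger).map
          (fun v => min (hunger.count v) (biscuit.count v))) := by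
      apply List.map_congr_left; intro v _; simp
    rw [e1, e2, e3, zero_add]
  have hA : feedDog hunger biscuit
      = (pvMpass (fun b h => h < b) hunger
          (biscuit.zip (pvFlags (fun v => hunger.count v) biscuit))
          (((((PySem.List.dedup hunger).map
              (fun v => min (hunger.count v) (biscuit.count v))).sum : Nat) : Int),
           pvFedMark (fun v => min (hunger.count v) (biscuit.count v)) hunger)).1.1 := by
    show (feedDogAPass hunger biscuit (fun b h => h < b)
        (feedDogAPass hunger biscuit (fun b h => b == h)
          (0, List.replicate hunger.length false, List.replicate biscuit.length false))).1 = _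
    rw [pvAPass_eq, pvAPass_eq, hA1,
      pvOuter_eq _ hunger biscuit (pvFlags (fun v => hunger.count v) biscuit) _
        (pvFedMark (fun v => min (hunger.count v) (biscuit.count v)) hunger)
        (pvFlags_length _ _) (by rw [pvFedMark_length])]
  have hdogs : pvUnfed (fun v => biscuit.count v) hunger
      = pvRem hunger (pvFedMark (fun v => min (hunger.count v) (biscuit.count v)) hunger) := by
    rw [pvRem_fedMark]
    exact pvUnfed_congr hunger _ _ (fun v => by omega)
  have hB : feedDog_alt hunger biscuit
      = (pvMpass (fun b h => h < b) hunger
          (biscuit.zip (pvFlags (fun v => hunger.count v) biscuit))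
          (((((PySem.List.dedup hunger).map
              (fun v => min (hunger.count v) (biscuit.count v))).sum : Nat) : Int),
           pvFedMark (fun v => min (hunger.count v) (biscuit.count v)) hunger)).1.1 := by
    show (biscuit.foldl _ ((hunger.foldl (fun d h => d.insert h (d.getD h 0 + 1))
        (PySem.Dict.empty : PySem.Dict Int Int)).keys.foldl _ 0, _, _)).1 = _
    rw [PySem.Dict.foldl_insert_getD_add_one_eq_counter hunger,
      PySem.Dict.foldl_insert_getD_add_one_eq_counter biscuit,
      pvBCount hunger biscuit,
      pvBDog biscuit (PySem.Dict.counter biscuit) (PySem.Dict.getD_counter biscuit)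
        hunger [] PySem.Dict.empty (fun v => biscuit.count v) (fun v => by simp),
      List.nil_append, hdogs,
      pvP2 hunger (PySem.Dict.counter hunger) (PySem.Dict.getD_counter hunger)
        biscuit _ _ PySem.Dict.empty (fun v => hunger.count v) (fun v => by simp)]
  rw [hA, hB]
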